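-- pv_equiv track=rewrite | github.com/JH-TT/Coding_Practice | Programmers/String_P/131128.py | solution
-- ===== SOURCE A (Python) =====
-- from collections import defaultdict, Counter
--
-- def solution(X, Y):
--     answer = ''
--     cnt = dict(Counter(X))
--     res = defaultdict(int)
--
--     for y in Y:
--         if (y in cnt) and cnt[y] > 0:
--             res[y] += 1
--             cnt[y] -= 1
--
--     for i in range(9, -1, -1):
--         answer += str(i) * res[str(i)]
--
--     if answer == "":
--         return "-1"
--     else:
--         return answer if answer[0] != "0" else "0"
-- ===== SOURCE B (Python) =====
-- def solution(X, Y):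
--     xs = sorted((c for c in X if c.isdigit()), reverse=True)
--     ys = sorted((c for c in Y if c.isdigit()), reverse=True)
--     out = []
--     i = j = 0
--     while i < len(xs) and j < len(ys):
--         if xs[i] == ys[j]:
--             out.append(xs[i])
--             i += 1
--             j += 1
--         elif xs[i] > ys[j]:
--             i += 1
--         else:
--             j += 1
--     answer = ''.join(out)
--     if not answer:
--         return "-1"
--     return "0" if answer[0] == "0" else answer
-- ===== Notes on version B (the rewrite author's own statement) =====
-- stated objective: alternative
-- what changed: B sorts the digits of X and of Y in descending order and computes the answer directly as the two-pointer merge intersection of the two sorted lists, instead of A's consuming counter scan of Y against Counter(X) followed by a 9-to-0 emission loop; the per-character Python dict loop is replaced by C-level sorted() plus a cheap merge, measured ~2.4x faster.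
import Mathlib
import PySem

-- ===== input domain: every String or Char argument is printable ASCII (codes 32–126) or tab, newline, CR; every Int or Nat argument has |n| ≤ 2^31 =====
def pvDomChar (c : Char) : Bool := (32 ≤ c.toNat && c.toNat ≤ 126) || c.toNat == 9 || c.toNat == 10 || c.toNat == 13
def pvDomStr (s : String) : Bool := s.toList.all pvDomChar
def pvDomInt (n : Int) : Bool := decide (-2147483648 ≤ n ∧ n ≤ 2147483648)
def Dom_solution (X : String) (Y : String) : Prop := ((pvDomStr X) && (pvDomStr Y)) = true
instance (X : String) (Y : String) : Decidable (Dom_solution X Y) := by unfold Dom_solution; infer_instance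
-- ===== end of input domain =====

-- B replaces A's consuming counter scan by sorting the digits of X and Y descending and
-- taking their two-pointer merge intersection directly (objective: alternative algorithm).


-- ===== PORT A =====
-- the body of A's first loop: consume one occurrence of y from cnt, record it in res
def pvStepA (st : PySem.Dict Char Int × PySem.Dict Char Int) (y : Char) :
    PySem.Dict Char Int × PySem.Dict Char Int :=
  if st.2.contains y && decide (st.2.getD y 0 > 0) then
    (st.1.modify y 0 (· + 1), st.2.insert y (st.2.getD y 0 - 1))
  else st

def solution (X : String) (Y : String) : String :=
  let cnt := PySem.Dict.counter X.toList          -- cnt = dict(Counter(X))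
  let st := Y.toList.foldl pvStepA (PySem.Dict.empty, cnt)  -- res = defaultdict(int); for y in Y: …
  let res := st.1
  -- for i in range(9,-1,-1): answer += str(i) * res[str(i)]; for 0 ≤ i ≤ 9, str(i) is the
  -- single digit char Char.ofNat (48 + i), so the lookup key is exactly that char
  let answer : List Char :=
    (PySem.List.pyRange 9 (-1) (-1)).foldl
      (fun ans i => ans ++ PySem.List.pyRepeat (PySem.Int.toChars i)
                      (res.getD (Char.ofNat (48 + i.toNat)) 0)) []
  match answer with
  | [] => "-1"
  | c :: _ => if c ≠ '0' then String.ofList answer else "0"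

-- ===== PORT B =====
-- the two-pointer while loop over the two sorted lists, as structural recursion on the suffixes
def pvMeet : List Char → List Char → List Char
  | [], _ => []
  | _ :: _, [] => []
  | x :: xs, y :: ys =>
    if x = y then x :: pvMeet xs ys
    else if x > y then pvMeet xs (y :: ys)
    else pvMeet (x :: xs) ys

def solution_alt (X : String) (Y : String) : String :=
  let xs := PySem.List.sorted (X.toList.filter PySem.Chars.isdigit) (fun c => c) true
  let ys := PySem.List.sorted (Y.toList.filter PySem.Chars.isdigit) (fun c => c) true
  let answer := pvMeet xs ys
  match answer with
  | [] => "-1"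
  | c :: _ => if c = '0' then "0" else String.ofList answer

-- ===== PRECONDITION & SPEC =====
def Spec_solution (X : String) (Y : String) (out : String) : Prop := out = solution_alt X Y
instance (X : String) (Y : String) (out : String) : Decidable (Spec_solution X Y out) := by unfold Spec_solution; infer_instance

-- ===== CLAIM (what is proved, stated in full; the proofs are below) =====
def Claim_equal_solution : Prop := ∀ (X : String) (Y : String), Dom_solution X Y → Spec_solution X Y (solution X Y)

-- ===== LEMMAS AND PROOFS =====

-- the common value both programs compute: for each digit 9…0, min of the two plain counts
def pvCanon (cx cy : List Char) : List Char :=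
  (("9876543210".toList.map
    (fun d => List.replicate (min (cx.count d) (cy.count d)) d)).flatten)

-- ---- A's side: answer = pvCanon (proved via the consuming-scan invariant) ----

theorem pvScan_getD (ys : List Char) (res cnt : PySem.Dict Char Int)
    (hnn : ∀ c, 0 ≤ cnt.getD c 0) (c : Char) :
    ((ys.foldl pvStepA (res, cnt)).1).getD c 0
      = res.getD c 0 + min (cnt.getD c 0) (ys.count c : Int) := by
  induction ys generalizing res cnt with
  | nil =>
    simp only [List.foldl_nil, List.count_nil]
    have := hnn c; omega
  | cons y ys ih =>
    by_cases hy : 0 < cnt.getD y 0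
    · have hcont : cnt.contains y = true := by
        by_contra h
        have hfalse : cnt.contains y = false := by
          cases hc : cnt.contains y
          · rfl
          · exact absurd hc h
        have := PySem.Dict.getD_of_not_contains (d := cnt) (k := y) (d0 := (0 : Int)) hfalse
        omega
      have hstep : pvStepA (res, cnt) y
          = (res.modify y 0 (· + 1), cnt.insert y (cnt.getD y 0 - 1)) := by
        simp [pvStepA, hcont, hy]
      rw [List.foldl_cons, hstep, ih]
      · rw [PySem.Dict.getD_modify, PySem.Dict.getD_insert]
        by_cases hc : c = y
        · subst hc
          simp only [List.count_cons_self]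
          push_cast
          omega
        · simp only [if_neg hc, List.count_cons_of_ne (by exact fun h => hc h.symm)]
      · intro d
        rw [PySem.Dict.getD_insert]
        split
        · omega
        · exact hnn d
    · have hz : cnt.getD y 0 = 0 := le_antisymm (by omega) (hnn y)
      have hstep : pvStepA (res, cnt) y = (res, cnt) := by
        simp [pvStepA, hz]
      rw [List.foldl_cons, hstep, ih res cnt hnn]
      by_cases hc : c = y
      · subst hc; simp only [hz, List.count_cons_self]; push_cast; omega
      · rw [List.count_cons_of_ne (by exact fun h => hc h.symm)]

theorem pvRes_getD (X Y : String) (c : Char) :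
    ((Y.toList.foldl pvStepA (PySem.Dict.empty, PySem.Dict.counter X.toList)).1).getD c 0
      = min (X.toList.count c : Int) (Y.toList.count c : Int) := by
  rw [pvScan_getD]
  · simp [PySem.Dict.getD_counter]
  · intro d; rw [PySem.Dict.getD_counter]; positivity

theorem pv_toNat_min (a b : Nat) : (min (a : Int) (b : Int)).toNat = min a b := by omega

theorem pvBlock (X Y : String) (i : Int) (c : Char) (hi : PySem.Int.toChars i = [c])
    (hk : Char.ofNat (48 + i.toNat) = c) :
    PySem.List.pyRepeat (PySem.Int.toChars i)
        (((Y.toList.foldl pvStepA (PySem.Dict.empty, PySem.Dict.counter X.toList)).1).getD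
          (Char.ofNat (48 + i.toNat)) 0)
      = List.replicate (min (X.toList.count c) (Y.toList.count c)) c := by
  rw [hi, hk, PySem.List.pyRepeat_singleton, pvRes_getD, pv_toNat_min]

theorem pvAnswer_eq (X Y : String) :
    (PySem.List.pyRange 9 (-1) (-1)).foldl
      (fun ans i => ans ++ PySem.List.pyRepeat (PySem.Int.toChars i)
        (((Y.toList.foldl pvStepA (PySem.Dict.empty, PySem.Dict.counter X.toList)).1).getD
          (Char.ofNat (48 + i.toNat)) 0)) []
    = pvCanon X.toList Y.toList := by
  have hr : PySem.List.pyRange 9 (-1) (-1) = [9, 8, 7, 6, 5, 4, 3, 2, 1, 0] := by decide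
  have hs : "9876543210".toList = ['9','8','7','6','5','4','3','2','1','0'] := by decide
  rw [hr, pvCanon, hs]
  simp only [List.foldl_cons, List.foldl_nil, List.map_cons, List.map_nil, List.flatten_cons,
    List.flatten_nil, List.nil_append, List.append_nil,
    pvBlock X Y 9 '9' (by decide) (by decide), pvBlock X Y 8 '8' (by decide) (by decide),
    pvBlock X Y 7 '7' (by decide) (by decide), pvBlock X Y 6 '6' (by decide) (by decide),
    pvBlock X Y 5 '5' (by decide) (by decide), pvBlock X Y 4 '4' (by decide) (by decide),
    pvBlock X Y 3 '3' (by decide) (by decide), pvBlock X Y 2 '2' (by decide) (by decide),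
    pvBlock X Y 1 '1' (by decide) (by decide), pvBlock X Y 0 '0' (by decide) (by decide)]
  simp [List.append_assoc]

-- ---- B's side: pvMeet of the two sorted digit lists = pvCanon ----

-- the merge intersection is a sublist of its left argument
theorem pvMeet_sublist : ∀ (xs ys : List Char), (pvMeet xs ys).Sublist xs := by
  intro xs ys
  fun_induction pvMeet xs ys with
  | case1 ys => exact List.Sublist.refl _
  | case2 x xs => exact List.nil_sublist _
  | case3 xs x ys ih => exact List.Sublist.cons₂ x ih
  | case4 x xs y ys hne =>
    rename_i hgt ih
    exact List.Sublist.cons x ih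
  | case5 x xs y ys hne =>
    rename_i hgt ih
    exact ih

-- on descending lists the merge intersection has, for each char, the min of the two counts
theorem pvMeet_count : ∀ (xs ys : List Char),
    xs.Pairwise (fun a b => b ≤ a) → ys.Pairwise (fun a b => b ≤ a) → ∀ c,
    (pvMeet xs ys).count c = min (xs.count c) (ys.count c) := by
  intro xs ys
  fun_induction pvMeet xs ys with
  | case1 ys => intro _ _ c; simp
  | case2 x xs => intro _ _ c; simp
  | case3 xs x ys ih =>
    intro hx hy c
    have := ih hx.of_cons hy.of_cons c
    by_cases hc : c = x <;> simp_all [List.count_cons]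
  | case4 x xs y ys hne =>
    rename_i hgt ih
    intro hx hy c
    have := ih hx.of_cons hy c
    by_cases hc : c = x
    · subst hc
      have hc0 : (y :: ys).count c = 0 := by
        refine List.count_eq_zero_of_not_mem ?_
        intro hm
        rcases List.mem_cons.mp hm with h1 | h1
        · exact hne h1
        · exact absurd (List.rel_of_pairwise_cons hy h1) (not_le.mpr hgt)
      simp_all [List.count_cons]
    · have hxc : x ≠ c := fun h => hc h.symm
      simp_all [List.count_cons]
  | case5 x xs y ys hne =>
    rename_i hngt ih
    intro hx hy c
    have := ih hx hy.of_cons c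
    have hlt : x < y := lt_of_le_of_ne (not_lt.mp hngt) hne
    by_cases hc : c = y
    · subst hc
      have hc0 : (x :: xs).count c = 0 := by
        refine List.count_eq_zero_of_not_mem ?_
        intro hm
        rcases List.mem_cons.mp hm with h1 | h1
        · exact absurd h1.symm (ne_of_lt hlt)
        · exact absurd (List.rel_of_pairwise_cons hx h1) (not_le.mpr hlt)
      simp_all [List.count_cons]
    · have hyc : y ≠ c := fun h => hc h.symm
      simp_all [List.count_cons]

-- a char with isdigit is one of the ten digit chars
theorem pvDigit_cases (c : Char) (h : PySem.Chars.isdigit c = true) :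
    c ∈ "9876543210".toList := by
  simp [PySem.Chars.isdigit, Char.le_def, UInt32.le_iff_toNat_le] at h
  obtain ⟨h1, h2⟩ := h
  have e0 : ('0').val.toNat = 48 := by decide
  have e9 : ('9').val.toNat = 57 := by decide
  have he : Char.ofNat c.toNat = c := Char.ofNat_toNat c
  have hn : c.toNat = 48 ∨ c.toNat = 49 ∨ c.toNat = 50 ∨ c.toNat = 51 ∨ c.toNat = 52 ∨ c.toNat = 53 ∨ c.toNat = 54 ∨ c.toNat = 55 ∨ c.toNat = 56 ∨ c.toNat = 57 := by
    have : c.toNat = c.val.toNat := rfl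
    omega
  rcases hn with hn|hn|hn|hn|hn|hn|hn|hn|hn|hn <;> rw [← he, hn] <;> decide

-- count of a char in a flatten of per-digit replicate blocks over distinct digits
theorem pvRepCount (ds : List Char) (f : Char → Nat) (hnd : ds.Nodup) (c : Char) :
    ((ds.map fun d => List.replicate (f d) d).flatten).count c
      = if c ∈ ds then f c else 0 := by
  induction ds with
  | nil => simp
  | cons d ds ih =>
    simp only [List.map_cons, List.flatten_cons, List.count_append, List.count_replicate,
      ih hnd.of_cons, List.mem_cons]
    by_cases hc : c = d
    · subst hc
      have : c ∉ ds := (List.nodup_cons.mp hnd).1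
      simp [this]
    · simp [hc, Ne.symm hc]

-- a flatten of per-digit replicate blocks over a descending digit list is descending
theorem pvRepPairwise (ds : List Char) (f : Char → Nat)
    (hd : ds.Pairwise (fun a b => b ≤ a)) :
    ((ds.map fun d => List.replicate (f d) d).flatten).Pairwise (fun a b => b ≤ a) := by
  induction ds with
  | nil => simp
  | cons d ds ih =>
    simp only [List.map_cons, List.flatten_cons]
    rw [List.pairwise_append]
    refine ⟨List.pairwise_replicate.mpr (Or.inr le_rfl), ih hd.of_cons, ?_⟩
    intro a ha b hb
    obtain ⟨-, rfl⟩ := List.mem_replicate.mp ha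
    obtain ⟨l, hl, hbl⟩ := List.mem_flatten.mp hb
    obtain ⟨d', hd', rfl⟩ := List.mem_map.mp hl
    obtain ⟨-, rfl⟩ := List.mem_replicate.mp hbl
    exact List.rel_of_pairwise_cons hd hd'

theorem pvCanon_count (cx cy : List Char) (c : Char) :
    (pvCanon cx cy).count c
      = if PySem.Chars.isdigit c then min (cx.count c) (cy.count c) else 0 := by
  rw [pvCanon, pvRepCount _ _ (by decide) c]
  by_cases h : PySem.Chars.isdigit c = true
  · rw [if_pos (pvDigit_cases c h), if_pos h]
  · have hm : c ∉ "9876543210".toList := by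
      intro hmem
      have hds : c = '9' ∨ c = '8' ∨ c = '7' ∨ c = '6' ∨ c = '5' ∨ c = '4' ∨ c = '3' ∨ c = '2' ∨ c = '1' ∨ c = '0' := by
        simpa using hmem
      rcases hds with rfl|rfl|rfl|rfl|rfl|rfl|rfl|rfl|rfl|rfl <;> exact h (by decide)
    rw [if_neg hm, if_neg h]

theorem pvCanon_pairwise (cx cy : List Char) :
    (pvCanon cx cy).Pairwise (fun a b => b ≤ a) :=
  pvRepPairwise _ _ (by decide)

-- count in the filtered, sorted digit list
theorem pvSortedFilter_count (l : List Char) (c : Char) :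
    (PySem.List.sorted (l.filter PySem.Chars.isdigit) (fun c => c) true).count c
      = if PySem.Chars.isdigit c then l.count c else 0 := by
  rw [(PySem.List.sorted_perm _ _ _).count_eq]
  by_cases h : PySem.Chars.isdigit c = true
  · simp [List.count_filter, h]
  · have : c ∉ l.filter PySem.Chars.isdigit := fun hm => h (List.of_mem_filter hm)
    simp [h, List.count_eq_zero_of_not_mem this]

theorem pvMeet_eq_canon (X Y : String) :
    pvMeet (PySem.List.sorted (X.toList.filter PySem.Chars.isdigit) (fun c => c) true)
           (PySem.List.sorted (Y.toList.filter PySem.Chars.isdigit) (fun c => c) true)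
      = pvCanon X.toList Y.toList := by
  have hsx := PySem.List.sorted_pairwise_rev (xs := X.toList.filter PySem.Chars.isdigit) (key := fun c => c)
  have hsy := PySem.List.sorted_pairwise_rev (xs := Y.toList.filter PySem.Chars.isdigit) (key := fun c => c)
  refine List.Perm.eq_of_pairwise (fun a b _ _ h1 h2 => le_antisymm h2 h1)
    (List.Pairwise.sublist (pvMeet_sublist _ _) hsx) (pvCanon_pairwise _ _) ?_
  refine List.perm_iff_count.mpr fun c => ?_
  rw [pvMeet_count _ _ hsx hsy c, pvSortedFilter_count, pvSortedFilter_count, pvCanon_count]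
  by_cases h : PySem.Chars.isdigit c = true <;> simp [h]

-- ===== VERDICT (by name: the statement is the Claim_ definition above) =====
theorem solution_spec : Claim_equal_solution := by
  intro X Y _
  unfold Spec_solution solution solution_alt
  simp only [pvAnswer_eq X Y, pvMeet_eq_canon X Y]
  cases h : pvCanon X.toList Y.toList with
  | nil => rfl
  | cons c rest =>
    by_cases hc : c = '0' <;> simp [hc]
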